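-- pv_equiv track=rewrite | github.com/adamghill/refreshcss | refreshcss/css/parser_v1.py | _get_css_classes_and_ids
-- ===== SOURCE A (Python) =====
-- def _handle_css_rule_part(css_rule_part: str, css_classes: set, ids: set) -> bool:
--     if css_rule_part:
--         if css_rule_part.startswith("."):
--             css_classes.add(css_rule_part[1:])
--         elif css_rule_part.startswith("#"):
--             ids.add(css_rule_part[1:])
--
--         return True
--
--     return False
--
-- def _get_css_classes_and_ids(css_rule: str) -> tuple[set, set]:
--     """
--     Get the CSS classes and IDs referenced
--     """
--
--     css_classes: set[str] = set()
--     ids: set[str] = set()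
--
--     bracket_count = 0
--
--     for rule_idx, r in enumerate(css_rule):
--         if r in ("+", ">", ":", "||", "~", " ", ",", "\n", "{"):
--             if r == "{":
--                 bracket_count += 1
--             elif r == "}":
--                 bracket_count -= 1
--
--             css_rule_portion = css_rule[:rule_idx]
--
--             if css_rule_portion:
--                 starting_idx = 0
--
--                 for portion_idx, p in enumerate(css_rule_portion):
--                     if p in (".", "#"):
--                         css_rule_part = css_rule_portion[starting_idx:portion_idx]
--
--                         if _handle_css_rule_part(css_rule_part, css_classes, ids):
--                             starting_idx = portion_idx
--                     elif portion_idx == len(css_rule_portion) - 1: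
--                         # Handle the last portion
--                         css_rule_part = css_rule_portion[starting_idx : portion_idx + 1]
--
--                         _handle_css_rule_part(css_rule_part, css_classes, ids)
--
--             if bracket_count == 0:
--                 (_css_classes, _ids) = _get_css_classes_and_ids(css_rule[rule_idx + 1 :])
--                 css_classes |= _css_classes
--                 ids |= _ids
--
--             return (css_classes, ids)
--
--     return (css_classes, ids)
-- ===== SOURCE B (Python) =====
-- # One linear pass over the string: segments are buffered and parsed once at
-- # their terminating delimiter, instead of the recursive suffix slicing of the
-- # original (a structurally different implementation; same observed cost).
-- # A trailing segment not terminated by a delimiter contributes nothing (as in A).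
--
-- _DELIMS = ("+", ">", ":", "~", " ", ",", "\n")
--
--
-- def _emit(token, css_classes, ids):
--     if token.startswith("."):
--         css_classes.add(token[1:])
--     elif token.startswith("#"):
--         ids.add(token[1:])
--
--
-- def _parse_segment(segment, css_classes, ids):
--     buf = ""
--     for c in segment:
--         if c in (".", "#"):
--             if buf:
--                 _emit(buf, css_classes, ids)
--             buf = c
--         else:
--             buf += c
--     if buf and buf[-1] not in (".", "#"):
--         _emit(buf, css_classes, ids)
--
--
-- def _get_css_classes_and_ids(css_rule):
--     css_classes, ids = set(), set()
--     segment = ""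
--     for c in css_rule:
--         if c == "{":
--             _parse_segment(segment, css_classes, ids)
--             return (css_classes, ids)
--         if c in _DELIMS:
--             _parse_segment(segment, css_classes, ids)
--             segment = ""
--         else:
--             segment += c
--     return (css_classes, ids)
-- ===== Notes on version B (the rewrite author's own statement) =====
-- stated objective: alternative
-- what changed: Replaced A's recursive suffix-slicing (each delimiter re-slices the prefix and recurses on a copied suffix, with an inner index loop re-slicing parts) with a single linear pass that buffers the current segment and token and parses each segment once at its terminating delimiter.
import Mathlib
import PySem

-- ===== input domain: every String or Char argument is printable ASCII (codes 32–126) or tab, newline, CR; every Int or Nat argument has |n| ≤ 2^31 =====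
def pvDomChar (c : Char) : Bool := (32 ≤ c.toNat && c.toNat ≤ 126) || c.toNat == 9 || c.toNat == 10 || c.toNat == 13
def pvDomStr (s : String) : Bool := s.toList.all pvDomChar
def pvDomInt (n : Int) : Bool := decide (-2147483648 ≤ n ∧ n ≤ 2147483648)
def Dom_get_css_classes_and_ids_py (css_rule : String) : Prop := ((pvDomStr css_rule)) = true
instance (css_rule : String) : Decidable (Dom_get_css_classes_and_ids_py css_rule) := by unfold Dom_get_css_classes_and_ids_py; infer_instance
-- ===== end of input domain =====

-- B replaces A's recursive suffix-slicing with one linear pass that buffers each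
-- segment and parses it once at its terminating delimiter (objective: alternative).
-- Outputs are Python sets; both ports build PySem.Set values in first-insertion order.

-- ===== PORT A =====
-- r in ("+", ">", ":", "||", "~", " ", ",", "\n", "{") — "||" can never equal a single character
def pvSplitChar (c : Char) : Bool :=
  c = '+' || c = '>' || c = ':' || c = '~' || c = ' ' || c = ',' || c = '\n' || c = '{'

-- _handle_css_rule_part: returns (the Python bool, the two updated sets)
def pvHandle (part : List Char) (cc ids : PySem.Set String) :
    Bool × PySem.Set String × PySem.Set String :=
  if part ≠ [] then
    if PySem.Chars.startswith part ['.'] then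
      (true, PySem.Set.add cc (String.ofList (PySem.List.slice part (some 1) none)), ids)
    else if PySem.Chars.startswith part ['#'] then
      (true, cc, PySem.Set.add ids (String.ofList (PySem.List.slice part (some 1) none)))
    else (true, cc, ids)
  else (false, cc, ids)

-- the 'for rule_idx, r in enumerate(css_rule)' loop scans to the first splitting
-- character (its body always returns there); pvFind is that scan, pvOuter the body.
def pvFind : List Char → Nat → Option (Nat × Char)
  | [], _ => none
  | r :: rem, idx => if pvSplitChar r then some (idx, r) else pvFind rem (idx + 1)

-- termination helper for pvOuter (cited in decreasing_by)
theorem pvFind_lt (cs : List Char) : ∀ (i idx : Nat) (r : Char),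
    pvFind cs i = some (idx, r) → i ≤ idx ∧ idx < i + cs.length := by
  induction cs with
  | nil => intro i idx r h; simp [pvFind] at h
  | cons c cs ih =>
    intro i idx r h
    simp only [pvFind] at h
    split at h
    · injection h with h'; injection h' with h1 h2; subst h1
      simp only [List.length_cons]; omega
    · have := ih (i + 1) idx r h; simp only [List.length_cons]; omega

-- inner loop 'for portion_idx, p in enumerate(css_rule_portion)' with state (starting_idx, sets)
def pvInner (portion : List Char) :
    List Char → Nat → Nat → PySem.Set String → PySem.Set String →
      PySem.Set String × PySem.Set String
  | [], _, _, cc, ids => (cc, ids)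
  | p :: rem, j, start, cc, ids =>
    if p = '.' ∨ p = '#' then
      pvInner portion rem (j + 1)
        (if (pvHandle (PySem.List.slice portion (some (start : Int)) (some (j : Int))) cc ids).1
         then j else start)
        (pvHandle (PySem.List.slice portion (some (start : Int)) (some (j : Int))) cc ids).2.1
        (pvHandle (PySem.List.slice portion (some (start : Int)) (some (j : Int))) cc ids).2.2
    else if j = portion.length - 1 then
      pvInner portion rem (j + 1) start
        (pvHandle (PySem.List.slice portion (some (start : Int)) (some ((j : Int) + 1))) cc ids).2.1
        (pvHandle (PySem.List.slice portion (some (start : Int)) (some ((j : Int) + 1))) cc ids).2.2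
    else pvInner portion rem (j + 1) start cc ids

-- the 'if css_rule_portion:' block: run the inner loop on the portion
def pvPortionSets (portion : List Char) : PySem.Set String × PySem.Set String :=
  if portion ≠ [] then pvInner portion portion 0 0 PySem.Set.empty PySem.Set.empty
  else (PySem.Set.empty, PySem.Set.empty)

def pvOuter (css : List Char) : PySem.Set String × PySem.Set String :=
  match h : pvFind css 0 with
  | none => (PySem.Set.empty, PySem.Set.empty)
  | some (idx, r) =>
    -- bracket_count += 1 / -= 1 (the '}' branch is unreachable: '}' is not a splitting char)
    if (if r = '{' then (0 : Int) + 1 else if r = '}' then (0 : Int) - 1 else 0) = 0 then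
      (PySem.Set.union (pvPortionSets (PySem.List.slice css none (some (idx : Int)))).1
        (pvOuter (PySem.List.slice css (some ((idx : Int) + 1)) none)).1,
       PySem.Set.union (pvPortionSets (PySem.List.slice css none (some (idx : Int)))).2
        (pvOuter (PySem.List.slice css (some ((idx : Int) + 1)) none)).2)
    else pvPortionSets (PySem.List.slice css none (some (idx : Int)))
  termination_by css.length
  decreasing_by
    all_goals
      have hb := pvFind_lt css 0 idx r h
      rw [PySem.List.slice_from css (by omega)]
      simp only [List.length_drop]
      omega

def get_css_classes_and_ids_py (css_rule : String) : List String × List String :=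
  pvOuter css_rule.toList

-- ===== PORT B =====
def pvDelimB (c : Char) : Bool :=
  c = '+' || c = '>' || c = ':' || c = '~' || c = ' ' || c = ',' || c = '\n'

-- _emit (token[1:] is List.drop 1, exact for any list)
def pvEmit (tok : List Char) (cc ids : PySem.Set String) :
    PySem.Set String × PySem.Set String :=
  if PySem.Chars.startswith tok ['.'] then (PySem.Set.add cc (String.ofList (tok.drop 1)), ids)
  else if PySem.Chars.startswith tok ['#'] then (cc, PySem.Set.add ids (String.ofList (tok.drop 1)))
  else (cc, ids)

-- _parse_segment: the for-loop over the segment with the token buffer, then the final flush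
-- (buf[-1] is PySem.List.pyGet? buf (-1), guarded by buf ≠ [])
def pvSegLoop (buf : List Char) :
    List Char → PySem.Set String → PySem.Set String →
      PySem.Set String × PySem.Set String
  | c :: rem, cc, ids =>
    if c = '.' ∨ c = '#' then
      pvSegLoop [c] rem
        (if buf ≠ [] then pvEmit buf cc ids else (cc, ids)).1
        (if buf ≠ [] then pvEmit buf cc ids else (cc, ids)).2
    else pvSegLoop (buf ++ [c]) rem cc ids
  | [], cc, ids =>
    if buf ≠ [] ∧ ¬(PySem.List.pyGet? buf (-1) = some '.' ∨ PySem.List.pyGet? buf (-1) = some '#')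
    then pvEmit buf cc ids else (cc, ids)

-- the main single pass: buffer the current segment, parse it at its terminating delimiter
def pvMain : List Char → List Char → PySem.Set String → PySem.Set String →
    PySem.Set String × PySem.Set String
  | [], _, cc, ids => (cc, ids)
  | c :: rem, seg, cc, ids =>
    if c = '{' then pvSegLoop [] seg cc ids
    else if pvDelimB c then
      pvMain rem [] (pvSegLoop [] seg cc ids).1 (pvSegLoop [] seg cc ids).2
    else pvMain rem (seg ++ [c]) cc ids

def get_css_classes_and_ids_py_alt (css_rule : String) : List String × List String :=
  pvMain css_rule.toList [] PySem.Set.empty PySem.Set.empty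

-- ===== PRECONDITION & SPEC =====
def Spec_get_css_classes_and_ids_py (css_rule : String) (out : List String × List String) : Prop := out = get_css_classes_and_ids_py_alt css_rule
instance (css_rule : String) (out : List String × List String) : Decidable (Spec_get_css_classes_and_ids_py css_rule out) := by unfold Spec_get_css_classes_and_ids_py; infer_instance

-- ===== CLAIM (what is proved, stated in full; the proofs are below) =====
def Claim_equal_get_css_classes_and_ids_py : Prop := ∀ (css_rule : String), Dom_get_css_classes_and_ids_py css_rule → Spec_get_css_classes_and_ids_py css_rule (get_css_classes_and_ids_py css_rule)

-- ===== LEMMAS AND PROOFS =====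

-- the (class?, name) events a token contributes
def pvEv (tok : List Char) : List (Bool × String) :=
  if PySem.Chars.startswith tok ['.'] then [(true, String.ofList (tok.drop 1))]
  else if PySem.Chars.startswith tok ['#'] then [(false, String.ofList (tok.drop 1))]
  else []

def pvApply (s : PySem.Set String × PySem.Set String) (e : Bool × String) :
    PySem.Set String × PySem.Set String :=
  if e.1 then (PySem.Set.add s.1 e.2, s.2) else (s.1, PySem.Set.add s.2 e.2)

def pvApplyEvs (s : PySem.Set String × PySem.Set String) (evs : List (Bool × String)) :
    PySem.Set String × PySem.Set String :=
  evs.foldl pvApply s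

-- events of B's segment parse (buffer buf, remaining chars)
def pvSegEvs (buf : List Char) : List Char → List (Bool × String)
  | c :: rem =>
    if c = '.' ∨ c = '#' then pvEv buf ++ pvSegEvs [c] rem
    else pvSegEvs (buf ++ [c]) rem
  | [] =>
    if buf ≠ [] ∧ ¬(PySem.List.pyGet? buf (-1) = some '.' ∨ PySem.List.pyGet? buf (-1) = some '#')
    then pvEv buf else []

-- events of A's inner loop (same machine, but the flush happens at the portion's last char)
def pvSegEvsA (buf : List Char) : List Char → List (Bool × String)
  | [] => []
  | p :: rem =>
    if p = '.' ∨ p = '#' then pvEv buf ++ pvSegEvsA [p] rem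
    else if rem = [] then pvEv (buf ++ [p])
    else pvSegEvsA (buf ++ [p]) rem

-- token shape: '.'/'#' can occur only as the head character
def pvTok (buf : List Char) : Prop := ∀ c ∈ buf.drop 1, ¬(c = '.' ∨ c = '#')

theorem pvTok_nil : pvTok [] := by intro c hc; simp at hc
theorem pvTok_single (p : Char) : pvTok [p] := by intro c hc; simp at hc
theorem pvTok_snoc {buf : List Char} {p : Char} (htok : pvTok buf)
    (hp : ¬(p = '.' ∨ p = '#')) : pvTok (buf ++ [p]) := by
  cases buf with
  | nil => intro c hc; simp at hc
  | cons b bs =>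
    intro c hc
    simp only [List.cons_append, List.drop_succ_cons, List.drop_zero] at hc
    rcases List.mem_append.mp hc with h | h
    · exact htok c (by simpa using h)
    · simp at h; subst h; exact hp

theorem pvEv_nil : pvEv [] = [] := by decide

theorem pvApplyEvs_append (s : PySem.Set String × PySem.Set String)
    (a b : List (Bool × String)) : pvApplyEvs s (a ++ b) = pvApplyEvs (pvApplyEvs s a) b :=
  List.foldl_append

theorem pvEmit_eq (tok : List Char) (cc ids : PySem.Set String) :
    pvEmit tok cc ids = pvApplyEvs (cc, ids) (pvEv tok) := by
  unfold pvEmit pvEv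
  split_ifs <;> rfl

theorem pvHandle_fst (part : List Char) (cc ids : PySem.Set String) :
    (pvHandle part cc ids).1 = decide (part ≠ []) := by
  unfold pvHandle; split_ifs <;> simp_all

theorem pvHandle_snd (part : List Char) (cc ids : PySem.Set String) :
    (pvHandle part cc ids).2 = pvApplyEvs (cc, ids) (pvEv part) := by
  by_cases h : part = []
  · subst h; rw [pvEv_nil]; rfl
  · have h1 : PySem.List.slice part (some 1) none = part.drop 1 := by
      rw [PySem.List.slice_from part (by omega)]; rfl
    unfold pvHandle pvEv
    rw [if_pos h, h1]
    split_ifs <;> rfl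

-- Set facts ------------------------------------------------------------

theorem pv_update_add (s t : List String) (x : String) :
    PySem.Set.update s (PySem.Set.add t x) = PySem.Set.add (PySem.Set.update s t) x := by
  by_cases hx : x ∈ t
  · rw [PySem.Set.add_of_mem hx,
      PySem.Set.add_of_mem ((PySem.Set.mem_update s t x).mpr (Or.inr hx))]
  · rw [PySem.Set.add_of_not_mem hx]
    show List.foldl PySem.Set.add s (t ++ [x]) = _
    rw [List.foldl_append]
    rfl

theorem pv_update_update (r : List String) : ∀ (s t : List String),
    PySem.Set.update s (PySem.Set.update t r) = PySem.Set.update (PySem.Set.update s t) r := by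
  induction r with
  | nil => intro s t; rfl
  | cons x r ih =>
    intro s t
    show PySem.Set.update s (PySem.Set.update (PySem.Set.add t x) r)
        = PySem.Set.update (PySem.Set.update s t) (x :: r)
    rw [ih s (PySem.Set.add t x), pv_update_add]
    rfl

def pvCls (evs : List (Bool × String)) : List String :=
  evs.filterMap (fun e => if e.1 then some e.2 else none)

def pvIdl (evs : List (Bool × String)) : List String :=
  evs.filterMap (fun e => if e.1 then none else some e.2)

theorem pvApplyEvs_eq (evs : List (Bool × String)) :
    ∀ (cc ids : PySem.Set String),
      pvApplyEvs (cc, ids) evs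
        = (PySem.Set.update cc (pvCls evs), PySem.Set.update ids (pvIdl evs)) := by
  induction evs with
  | nil => intro cc ids; rfl
  | cons e evs ih =>
    intro cc ids
    rcases e with ⟨b, x⟩
    cases b
    · show pvApplyEvs (cc, PySem.Set.add ids x) evs = _
      rw [ih]
      have h1 : pvCls ((false, x) :: evs) = pvCls evs := by simp [pvCls]
      have h2 : pvIdl ((false, x) :: evs) = x :: pvIdl evs := by simp [pvIdl]
      rw [h1, h2]
      rfl
    · show pvApplyEvs (PySem.Set.add cc x, ids) evs = _
      rw [ih]
      have h1 : pvCls ((true, x) :: evs) = x :: pvCls evs := by simp [pvCls]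
      have h2 : pvIdl ((true, x) :: evs) = pvIdl evs := by simp [pvIdl]
      rw [h1, h2]
      rfl

theorem pv_union_applyEvs (evs : List (Bool × String)) (cc ids : PySem.Set String) :
    (PySem.Set.union cc (pvApplyEvs (PySem.Set.empty, PySem.Set.empty) evs).1,
     PySem.Set.union ids (pvApplyEvs (PySem.Set.empty, PySem.Set.empty) evs).2)
      = pvApplyEvs (cc, ids) evs := by
  simp only [pvApplyEvs_eq]
  show (PySem.Set.update cc (PySem.Set.update PySem.Set.empty (pvCls evs)),
        PySem.Set.update ids (PySem.Set.update PySem.Set.empty (pvIdl evs))) = _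
  rw [pv_update_update, pv_update_update]
  rfl

-- A's inner loop produces exactly the events of pvSegEvsA ----------------

theorem pvInner_evs (rem : List Char) :
    ∀ (left buf : List Char) (cc ids : PySem.Set String), pvTok buf →
      pvInner (left ++ buf ++ rem) rem (left.length + buf.length) left.length cc ids
        = pvApplyEvs (cc, ids) (pvSegEvsA buf rem) := by
  induction rem with
  | nil => intro left buf cc ids _; rfl
  | cons p rem ih =>
    intro left buf cc ids htok
    rw [pvSegEvsA]
    by_cases hp : p = '.' ∨ p = '#'
    · have hsl : PySem.List.slice (left ++ buf ++ p :: rem) (some (left.length : Int))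
          (some ((left.length + buf.length : Nat) : Int)) = buf := by
        rw [PySem.List.slice_natCast, Nat.add_sub_cancel_left,
          List.append_assoc, List.drop_left, List.take_left]
      rw [pvInner, if_pos hp, if_pos hp, hsl, pvApplyEvs_append]
      have hstart : (if (pvHandle buf cc ids).1 = true
          then left.length + buf.length else left.length) = (left ++ buf).length := by
        rw [pvHandle_fst]
        by_cases hb : buf = []
        · subst hb; simp
        · simp [hb]
      rw [hstart, pvHandle_snd]
      have h2 := ih (left ++ buf) [p] (pvApplyEvs (cc, ids) (pvEv buf)).1
        (pvApplyEvs (cc, ids) (pvEv buf)).2 (pvTok_single p)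
      simpa using h2
    · rw [pvInner, if_neg hp, if_neg hp]
      by_cases hrem : rem = []
      · subst hrem
        rw [if_pos (by simp), if_pos rfl]
        have hsl2 : PySem.List.slice (left ++ buf ++ [p]) (some (left.length : Int))
            (some (((left.length + buf.length : Nat) : Int) + 1)) = buf ++ [p] := by
          have hc : ((left.length + buf.length : Nat) : Int) + 1
              = ((left.length + buf.length + 1 : Nat) : Int) := by push_cast; ring
          rw [hc, PySem.List.slice_natCast, List.append_assoc, List.drop_left]
          rw [List.take_of_length_le (by simp; omega)]
        rw [hsl2, pvInner, ← pvHandle_snd (buf ++ [p]) cc ids]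
      · have hr0 : rem.length ≠ 0 := by simpa using hrem
        rw [if_neg (by simp only [List.length_append, List.length_cons]; omega), if_neg hrem]
        have h2 := ih left (buf ++ [p]) cc ids (pvTok_snoc htok hp)
        simpa [Nat.add_assoc] using h2

theorem pvSegEvsA_eq (rem : List Char) : ∀ (buf : List Char), pvTok buf → rem ≠ [] →
    pvSegEvsA buf rem = pvSegEvs buf rem := by
  induction rem with
  | nil => intro buf _ h; exact absurd rfl h
  | cons p rem ih =>
    intro buf htok _
    rw [pvSegEvsA, pvSegEvs]
    by_cases hp : p = '.' ∨ p = '#'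
    · rw [if_pos hp, if_pos hp]
      by_cases hrem : rem = []
      · subst hrem
        rw [pvSegEvsA, pvSegEvs, if_neg]
        intro hcon
        exact hcon.2 (by rw [PySem.List.pyGet?_neg_one]; rcases hp with h | h <;> simp [h])
      · rw [ih [p] (pvTok_single p) hrem]
    · rw [if_neg hp, if_neg hp]
      by_cases hrem : rem = []
      · subst hrem
        rw [if_pos rfl, pvSegEvs, if_pos]
        refine ⟨by simp, ?_⟩
        rw [PySem.List.pyGet?_neg_one, List.getLast?_concat]
        simpa using hp
      · rw [if_neg hrem, ih (buf ++ [p]) (pvTok_snoc htok hp) hrem]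

theorem pvPortionSets_evs (portion : List Char) :
    pvPortionSets portion
      = pvApplyEvs (PySem.Set.empty, PySem.Set.empty) (pvSegEvs [] portion) := by
  unfold pvPortionSets
  by_cases h : portion = []
  · subst h; rfl
  · rw [if_pos h]
    have := pvInner_evs portion [] [] PySem.Set.empty PySem.Set.empty pvTok_nil
    simp only [List.nil_append, List.length_nil, Nat.add_zero] at this
    rw [this, pvSegEvsA_eq portion [] pvTok_nil h]

-- B's segment parse produces the same events -----------------------------

theorem pvSegLoop_evs (rem : List Char) :
    ∀ (buf : List Char) (cc ids : PySem.Set String),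
      pvSegLoop buf rem cc ids = pvApplyEvs (cc, ids) (pvSegEvs buf rem) := by
  induction rem with
  | nil =>
    intro buf cc ids
    rw [pvSegLoop, pvSegEvs]
    split_ifs with h
    · rw [pvEmit_eq]
    · rfl
  | cons c rem ih =>
    intro buf cc ids
    rw [pvSegLoop, pvSegEvs]
    by_cases hc : c = '.' ∨ c = '#'
    · rw [if_pos hc, if_pos hc, pvApplyEvs_append]
      by_cases hb : buf = []
      · subst hb
        rw [if_neg (by simp), pvEv_nil]
        exact ih [c] cc ids
      · rw [if_pos hb, pvEmit_eq]
        exact ih [c] _ _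
    · rw [if_neg hc, if_neg hc]
      exact ih (buf ++ [c]) cc ids

-- pvFind / pvOuter structure ---------------------------------------------

theorem pvFind_none (seg : List Char) (h : ∀ c ∈ seg, pvSplitChar c = false) :
    ∀ i, pvFind seg i = none := by
  induction seg with
  | nil => intro i; rfl
  | cons c seg ih =>
    intro i
    rw [pvFind, if_neg (by simp [h c (by simp)])]
    exact ih (fun c hc => h c (by simp [hc])) (i + 1)

theorem pvFind_eq_none (css : List Char) : ∀ i, pvFind css i = none →
    ∀ c ∈ css, pvSplitChar c = false := by
  induction css with
  | nil => intro i _ c hc; simp at hc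
  | cons x css ih =>
    intro i h c hc
    rw [pvFind] at h
    split at h
    · exact absurd h (by simp)
    · rcases List.mem_cons.mp hc with h' | h'
      · subst h'; simpa using ‹¬pvSplitChar c = true›
      · exact ih (i + 1) h c h'

theorem pvFind_append (seg : List Char) (h : ∀ c ∈ seg, pvSplitChar c = false)
    (d : Char) (hd : pvSplitChar d = true) (rest : List Char) :
    ∀ i, pvFind (seg ++ d :: rest) i = some (i + seg.length, d) := by
  induction seg with
  | nil => intro i; simp [pvFind, hd]
  | cons c seg ih =>
    intro i
    rw [List.cons_append, pvFind, if_neg (by simp [h c (by simp)]),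
      ih (fun c hc => h c (by simp [hc])) (i + 1)]
    simp only [List.length_cons]
    congr 2
    omega

theorem pvOuter_free (css : List Char) (h : ∀ c ∈ css, pvSplitChar c = false) :
    pvOuter css = (PySem.Set.empty, PySem.Set.empty) := by
  rw [pvOuter]
  split
  · rfl
  · rename_i idx r heq
    rw [pvFind_none css h 0] at heq
    exact absurd heq (by simp)

theorem pvOuter_split (seg : List Char) (hseg : ∀ c ∈ seg, pvSplitChar c = false)
    (d : Char) (hd : pvSplitChar d = true) (rest : List Char) :
    pvOuter (seg ++ d :: rest) =
      if d = '{' then pvPortionSets seg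
      else (PySem.Set.union (pvPortionSets seg).1 (pvOuter rest).1,
            PySem.Set.union (pvPortionSets seg).2 (pvOuter rest).2) := by
  rw [pvOuter]
  split
  · rename_i heq
    rw [pvFind_append seg hseg d hd rest 0] at heq
    exact absurd heq (by simp)
  · rename_i idx r heq
    rw [pvFind_append seg hseg d hd rest 0] at heq
    injection heq with heq
    injection heq with h1 h2
    subst h2
    have hidx : idx = seg.length := by omega
    subst hidx
    have hport : PySem.List.slice (seg ++ d :: rest) none (some (seg.length : Int)) = seg := by
      rw [PySem.List.slice_to _ (by omega)]
      simp
    have hsuf : PySem.List.slice (seg ++ d :: rest) (some ((seg.length : Int) + 1)) none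
        = rest := by
      rw [PySem.List.slice_from _ (by omega)]
      have h1 : ((seg.length : Int) + 1).toNat = (seg ++ [d]).length := by simp
      have h2 : seg ++ d :: rest = (seg ++ [d]) ++ rest := by simp
      rw [h1, h2, List.drop_left]
    have hdne : d ≠ '}' := by
      intro hcon; subst hcon; simp [pvSplitChar] at hd
    rw [hport, hsuf]
    by_cases hbr : d = '{'
    · rw [if_pos hbr, if_pos hbr, if_neg (by norm_num)]
    · rw [if_neg hbr, if_neg hbr, if_neg hdne, if_pos rfl]

-- pvOuter's components carry no duplicates --------------------------------

theorem pvFind_decomp (css : List Char) : ∀ (i idx : Nat) (r : Char),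
    pvFind css i = some (idx, r) →
      ∃ seg rest, css = seg ++ r :: rest ∧ (∀ c ∈ seg, pvSplitChar c = false)
        ∧ pvSplitChar r = true := by
  induction css with
  | nil => intro i idx r h; simp [pvFind] at h
  | cons c css ih =>
    intro i idx r h
    rw [pvFind] at h
    by_cases hc : pvSplitChar c = true
    · rw [if_pos hc] at h
      injection h with h'
      injection h' with h1 h2
      subst h2
      exact ⟨[], css, rfl, by simp, hc⟩
    · rw [if_neg hc] at h
      rcases ih (i + 1) idx r h with ⟨seg, rest, h1, h2, h3⟩
      refine ⟨c :: seg, rest, by simp [h1], ?_, h3⟩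
      intro x hx
      rcases List.mem_cons.mp hx with h' | h'
      · subst h'; simpa using hc
      · exact h2 x h'

theorem pvPortionSets_nodup (seg : List Char) :
    (pvPortionSets seg).1.Nodup ∧ (pvPortionSets seg).2.Nodup := by
  rw [pvPortionSets_evs, pvApplyEvs_eq]
  refine ⟨?_, ?_⟩ <;>
    · show (PySem.Set.update [] _).Nodup
      rw [show ∀ l : List String, PySem.Set.update [] l = PySem.Set.ofList l from
        fun l => (PySem.Set.ofList_eq_foldl l).symm]
      exact PySem.Set.nodup_ofList _

theorem pvOuter_nodup (css : List Char) :
    (pvOuter css).1.Nodup ∧ (pvOuter css).2.Nodup := by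
  match h : pvFind css 0 with
  | none =>
    rw [pvOuter_free css (pvFind_eq_none css 0 h)]
    exact ⟨List.nodup_nil, List.nodup_nil⟩
  | some (idx, r) =>
    rcases pvFind_decomp css 0 idx r h with ⟨seg, rest, h1, h2, h3⟩
    subst h1
    rw [pvOuter_split seg h2 r h3 rest]
    rcases pvPortionSets_nodup seg with ⟨n1, n2⟩
    split_ifs
    · exact ⟨n1, n2⟩
    · exact ⟨PySem.Set.nodup_update _ _ n1, PySem.Set.nodup_update _ _ n2⟩

-- the main correspondence --------------------------------------------------

theorem pvMain_eq (cs : List Char) :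
    ∀ (seg : List Char) (cc ids : PySem.Set String),
      (∀ c ∈ seg, pvSplitChar c = false) →
      pvMain cs seg cc ids
        = (PySem.Set.union cc (pvOuter (seg ++ cs)).1,
           PySem.Set.union ids (pvOuter (seg ++ cs)).2) := by
  induction cs with
  | nil =>
    intro seg cc ids hseg
    rw [pvMain, List.append_nil, pvOuter_free seg hseg]
    rfl
  | cons c cs ih =>
    intro seg cc ids hseg
    have hsplit : pvSplitChar c = (pvDelimB c || c = '{') := by
      simp [pvSplitChar, pvDelimB, Bool.or_assoc]
    rw [pvMain]
    by_cases hbr : c = '{'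
    · rw [if_pos hbr]
      subst hbr
      rw [pvOuter_split seg hseg '{' (by decide) cs, if_pos rfl]
      rw [pvSegLoop_evs, pvPortionSets_evs]
      exact (pv_union_applyEvs _ cc ids).symm
    · rw [if_neg hbr]
      by_cases hdel : pvDelimB c = true
      · rw [if_pos hdel]
        rw [pvOuter_split seg hseg c (by rw [hsplit, hdel]; rfl) cs, if_neg hbr]
        rw [pvSegLoop_evs, ih [] _ _ (by intro x hx; simp at hx)]
        rw [pvPortionSets_evs]
        simp only [pvApplyEvs_eq, List.nil_append, PySem.Set.union]
        rw [pv_update_update, pv_update_update, pv_update_update, pv_update_update]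
        rfl
      · rw [if_neg hdel]
        have hfree : ∀ x ∈ seg ++ [c], pvSplitChar x = false := by
          intro x hx
          rcases List.mem_append.mp hx with h | h
          · exact hseg x h
          · simp at h; subst h
            rw [hsplit]
            simp only [Bool.not_eq_true] at hdel
            simp [hdel, hbr]
        rw [ih (seg ++ [c]) cc ids hfree]
        simp

-- the sets start from empty, so the leading unions vanish ------------------

theorem pv_union_empty (xs : List String) (h : xs.Nodup) :
    PySem.Set.union PySem.Set.empty xs = xs := by
  show List.foldl PySem.Set.add [] xs = xs
  rw [← PySem.Set.ofList_eq_foldl]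
  exact PySem.Set.ofList_eq_self_of_nodup xs h

-- ===== VERDICT (by name: the statement is the Claim_ definition above) =====
theorem get_css_classes_and_ids_py_spec : Claim_equal_get_css_classes_and_ids_py := by
  intro css_rule _
  show get_css_classes_and_ids_py css_rule = get_css_classes_and_ids_py_alt css_rule
  unfold get_css_classes_and_ids_py get_css_classes_and_ids_py_alt
  rw [pvMain_eq css_rule.toList [] PySem.Set.empty PySem.Set.empty (by intro c hc; simp at hc)]
  rw [List.nil_append]
  rcases pvOuter_nodup css_rule.toList with ⟨n1, n2⟩
  rw [pv_union_empty _ n1, pv_union_empty _ n2]
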